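-- pv_equiv track=rewrite | github.com/tudny/MIMUW-collection | WBO/WBO-collection/Lab12/lab.py | to_int_keys_best
-- ===== SOURCE A (Python) =====
-- def to_int_keys_best(l):
--     """
--     l: iterable of keys
--     returns: a list with integer keys
--     """
--     seen = set()
--     ls = []
--     for e in l:
--         if e not in seen:
--             ls.append(e)
--             seen.add(e)
--     ls.sort()
--     index = {v: i for i, v in enumerate(ls)}
--     return [index[v] for v in l]
-- ===== SOURCE B (Python) =====
-- def to_int_keys_best(l):
--     """
--     l: iterable of keys
--     returns: a list with integer keys
--     """
--     return [len({x for x in l if x < v}) for v in l]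
-- ===== Notes on version B (the rewrite author's own statement) =====
-- stated objective: simpler
-- what changed: Replaces the dedup-set + sort + rank-dict pipeline by a direct one-liner: each element's key is the number of distinct values in l that are smaller than it (no sorting, no dict).
import Mathlib
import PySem

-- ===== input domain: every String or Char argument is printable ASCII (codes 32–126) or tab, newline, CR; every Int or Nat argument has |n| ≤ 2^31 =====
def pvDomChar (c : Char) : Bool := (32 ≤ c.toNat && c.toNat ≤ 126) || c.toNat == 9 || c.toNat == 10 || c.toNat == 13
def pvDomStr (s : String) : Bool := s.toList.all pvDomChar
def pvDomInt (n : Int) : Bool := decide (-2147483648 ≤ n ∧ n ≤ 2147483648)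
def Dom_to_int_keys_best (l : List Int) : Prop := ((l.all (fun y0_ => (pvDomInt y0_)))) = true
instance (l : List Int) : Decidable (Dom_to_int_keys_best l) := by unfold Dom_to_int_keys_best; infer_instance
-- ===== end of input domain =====

-- B replaces A's dedup-set + sort + rank-dict pipeline by a direct count of distinct smaller values per element (simpler, not faster).


-- ===== PORT A =====
-- the 'for e in l' loop carrying (seen, ls)
def to_int_keys_best (l : List Int) : List Int :=
  let st := l.foldl (fun (p : PySem.Set Int × List Int) e =>
      if PySem.Set.contains p.1 e then p else (PySem.Set.add p.1 e, p.2 ++ [e])) (PySem.Set.empty, [])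
  let ls := PySem.List.sorted st.2 (fun x => x) false
  let index := (PySem.List.enumerate ls 0).foldl
      (fun (d : PySem.Dict Int Int) p => d.insert p.2 p.1) PySem.Dict.empty
  -- index[v]: every v ∈ l is a key of index, so Python's lookup never raises; getD 0 is exact here
  l.map (fun v => index.getD v 0)

-- ===== PORT B =====
def to_int_keys_best_alt (l : List Int) : List Int :=
  l.map (fun v => ((PySem.Set.ofList (l.filter (fun x => decide (x < v)))).length : Int))

-- ===== PRECONDITION & SPEC =====
def Spec_to_int_keys_best (l : List Int) (out : List Int) : Prop := out = to_int_keys_best_alt l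
instance (l : List Int) (out : List Int) : Decidable (Spec_to_int_keys_best l out) := by unfold Spec_to_int_keys_best; infer_instance

-- ===== CLAIM (what is proved, stated in full; the proofs are below) =====
def Claim_equal_to_int_keys_best : Prop := ∀ (l : List Int), Dom_to_int_keys_best l → Spec_to_int_keys_best l (to_int_keys_best l)

-- ===== LEMMAS AND PROOFS =====

-- A's (seen, ls) loop keeps its two components equal; both are Set.ofList l
lemma pvFold_pair (l : List Int) (s : PySem.Set Int) :
    l.foldl (fun (p : PySem.Set Int × List Int) e =>
      if PySem.Set.contains p.1 e then p else (PySem.Set.add p.1 e, p.2 ++ [e])) (s, s)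
    = (l.foldl PySem.Set.add s, l.foldl PySem.Set.add s) := by
  induction l generalizing s with
  | nil => rfl
  | cons x xs ih =>
      simp only [List.foldl_cons]
      have hc : (if PySem.Set.contains s x = true then ((s, s) : PySem.Set Int × List Int)
            else (PySem.Set.add s x, s ++ [x]))
          = (PySem.Set.add s x, PySem.Set.add s x) := by
        by_cases h : x ∈ s <;> simp [PySem.Set.add, h]
      rw [hc]
      exact ih _

-- the enumerate-fold dict leaves absent keys alone
lemma pvDict_fold_not_mem (ls : List Int) (v : Int) (hv : v ∉ ls) :
    ∀ (d : PySem.Dict Int Int) (s : Int),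
    ((PySem.List.enumerate ls s).foldl (fun d p => d.insert p.2 p.1) d).get? v = d.get? v := by
  induction ls with
  | nil => intro d s; simp [PySem.List.enumerate_nil]
  | cons x xs ih =>
      intro d s
      have hne : v ≠ x := fun h => hv (h ▸ List.mem_cons_self ..)
      have hvx : v ∉ xs := fun h => hv (List.mem_cons_of_mem _ h)
      rw [PySem.List.enumerate_cons]
      simp only [List.foldl_cons]
      rw [ih hvx, PySem.Dict.get?_insert]
      simp [hne]

-- the dict {v: i for i, v in enumerate(ls)} maps each key of a nodup ls to its index
lemma pvDict_fold_getD (ls : List Int) (v : Int) (hnd : ls.Nodup) (hv : v ∈ ls) :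
    ∀ (d : PySem.Dict Int Int) (s : Int),
    ((PySem.List.enumerate ls s).foldl (fun d p => d.insert p.2 p.1) d).getD v 0
      = s + (ls.idxOf v : Int) := by
  induction ls with
  | nil => cases hv
  | cons x xs ih =>
      intro d s
      rw [PySem.List.enumerate_cons]
      simp only [List.foldl_cons]
      by_cases h : v = x
      · subst h
        have hvx : v ∉ xs := (List.nodup_cons.mp hnd).1
        rw [PySem.Dict.getD_eq_get?_getD, pvDict_fold_not_mem xs v hvx,
            PySem.Dict.get?_insert_self]
        simp [List.idxOf_cons_self]
      · have hvx : v ∈ xs := (List.mem_cons.mp hv).resolve_left h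
        rw [ih (List.nodup_cons.mp hnd).2 hvx]
        have : (x :: xs).idxOf v = xs.idxOf v + 1 := by
          simp [Ne.symm h]
        rw [this]
        push_cast
        ring

-- in a strictly increasing list, the index of v is the number of elements below v
lemma pvIdx_filter (ls : List Int) (v : Int) (hp : ls.Pairwise (· < ·)) (hv : v ∈ ls) :
    (ls.idxOf v : Int) = ((ls.filter (fun x => decide (x < v))).length : Int) := by
  induction ls with
  | nil => cases hv
  | cons x xs ih =>
      rcases List.pairwise_cons.mp hp with ⟨hx, hxs⟩
      by_cases h : v = x
      · subst h
        have : ∀ y ∈ v :: xs, ¬ (y < v) := by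
          intro y hy
          rcases List.mem_cons.mp hy with h' | h'
          · omega
          · exact fun hlt => absurd (hx y h') (by omega)
        have hfil : (v :: xs).filter (fun x => decide (x < v)) = [] := by
          apply List.filter_eq_nil_iff.mpr
          intro y hy
          simpa using this y hy
        simp [hfil, List.idxOf_cons_self]
      · have hvx : v ∈ xs := (List.mem_cons.mp hv).resolve_left h
        have hxv : x < v := hx v hvx
        have : (x :: xs).idxOf v = xs.idxOf v + 1 := by
          simp [Ne.symm h]
        rw [this, List.filter_cons_of_pos (by simpa using hxv)]
        have := ih hxs hvx
        simp only [List.length_cons] at *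
        push_cast at *
        omega

-- zeta-reduced form of A's dedup loop starting from the empty set
lemma pvFold_init (l : List Int) :
    l.foldl (fun (p : PySem.Set Int × List Int) e =>
      if PySem.Set.contains p.1 e then p else (PySem.Set.add p.1 e, p.2 ++ [e])) (PySem.Set.empty, [])
    = (PySem.Set.ofList l, PySem.Set.ofList l) := pvFold_pair l []

-- two nodup integer lists with the same members have the same length
lemma pvLen_eq_of_nodup_of_mem_iff (a b : List Int) (ha : a.Nodup) (hb : b.Nodup)
    (h : ∀ x, x ∈ a ↔ x ∈ b) : a.length = b.length :=
  (List.perm_of_nodup_nodup_toFinset_eq ha hb (by ext x; simp [h x])).length_eq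

lemma pvMain (l : List Int) (v : Int) (hv : v ∈ l) :
    (((PySem.List.enumerate (PySem.List.sorted (PySem.Set.ofList l) (fun x => x) false) 0).foldl
      (fun (d : PySem.Dict Int Int) p => d.insert p.2 p.1) PySem.Dict.empty).getD v 0)
    = ((PySem.Set.ofList (l.filter (fun x => decide (x < v)))).length : Int) := by
  set ls := PySem.List.sorted (PySem.Set.ofList l) (fun x => x) false with hls
  have hperm : ls.Perm (PySem.Set.ofList l) := PySem.List.sorted_perm ..
  have hnd : ls.Nodup := hperm.nodup_iff.mpr (PySem.Set.nodup_ofList l)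
  have hpw : ls.Pairwise (· < ·) := PySem.List.sorted_ofList_pairwise_lt l
  have hvls : v ∈ ls := hperm.mem_iff.mpr ((PySem.Set.mem_ofList ..).mpr hv)
  rw [pvDict_fold_getD ls v hnd hvls PySem.Dict.empty 0, zero_add,
      pvIdx_filter ls v hpw hvls]
  congr 1
  apply pvLen_eq_of_nodup_of_mem_iff
  · exact hnd.filter _
  · exact PySem.Set.nodup_ofList _
  · intro x
    simp [List.mem_filter, PySem.Set.mem_ofList, hperm.mem_iff]

-- ===== VERDICT (by name: the statement is the Claim_ definition above) =====
theorem to_int_keys_best_spec : Claim_equal_to_int_keys_best := by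
  intro l _
  unfold Spec_to_int_keys_best to_int_keys_best to_int_keys_best_alt
  simp only [pvFold_init]
  apply List.map_congr_left
  intro v hv
  exact pvMain l v hv
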